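-- pv_equiv track=rewrite | github.com/Ngdinhkhoi/API-Threat-Detection-Model | src/utils_clean.py | longest_special_run
-- ===== SOURCE A (Python) =====
-- def longest_special_run(s: str) -> int:
--     if not s:
--         return 0
--     cur = 0
--     max_run = 0
--     for ch in s:
--         if not ch.isalnum() and not ch.isspace():
--             cur += 1
--             max_run = max(max_run, cur)
--         else:
--             cur = 0
--     return max_run
-- ===== SOURCE B (Python) =====
-- def longest_special_run(s: str) -> int:
--     cleaned = ''.join(ch if (not ch.isalnum() and not ch.isspace()) else ' ' for ch in s)
--     return max((len(seg) for seg in cleaned.split()), default=0)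
-- ===== Notes on version B (the rewrite author's own statement) =====
-- stated objective: idiomatic
-- what changed: Replaces the running-counter/max loop with a segment-then-reduce formulation: non-special characters are mapped to spaces, str.split() yields the maximal special runs, and the answer is the max segment length with default 0.
import Mathlib
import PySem

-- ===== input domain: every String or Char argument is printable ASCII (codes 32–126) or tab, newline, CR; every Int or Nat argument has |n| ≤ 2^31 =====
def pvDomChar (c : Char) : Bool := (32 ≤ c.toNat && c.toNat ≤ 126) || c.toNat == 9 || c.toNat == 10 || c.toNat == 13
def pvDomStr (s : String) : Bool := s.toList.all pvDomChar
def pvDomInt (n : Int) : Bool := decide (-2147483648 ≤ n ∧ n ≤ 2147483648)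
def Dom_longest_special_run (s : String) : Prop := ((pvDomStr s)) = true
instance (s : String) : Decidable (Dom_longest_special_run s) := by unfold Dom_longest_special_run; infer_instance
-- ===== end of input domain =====

-- B maps non-special chars to ' ' and takes the max length of the whitespace-split
-- segments (segment-then-reduce) instead of A's running-counter/max loop; same O(n) cost.

-- shared predicate: "special" = neither alphanumeric nor whitespace (Python's test)
def pvSpecial (c : Char) : Bool := !PySem.Chars.isalnum c && !PySem.Chars.isspace c

-- ===== PORT A =====
def longest_special_run (s : String) : Int :=
  if s.toList = [] then 0
  else
    (s.toList.foldl
      (fun (p : Int × Int) ch =>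
        if pvSpecial ch then
          let cur := p.1 + 1
          (cur, max p.2 cur)
        else (0, p.2))
      (0, 0)).2

-- ===== PORT B =====
def longest_special_run_alt (s : String) : Int :=
  let cleaned : List Char := s.toList.map (fun ch => if pvSpecial ch then ch else ' ')
  let lens : List Int := (PySem.Chars.split₀ cleaned).map (fun seg => (seg.length : Int))
  match PySem.List.max? lens (fun x => x) with
  | none => 0
  | some m => m

-- ===== PRECONDITION & SPEC =====
def Spec_longest_special_run (s : String) (out : Int) : Prop := out = longest_special_run_alt s
instance (s : String) (out : Int) : Decidable (Spec_longest_special_run s out) := by unfold Spec_longest_special_run; infer_instance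

-- ===== CLAIM (what is proved, stated in full; the proofs are below) =====
def Claim_equal_longest_special_run : Prop := ∀ (s : String), Dom_longest_special_run s → Spec_longest_special_run s (longest_special_run s)

-- ===== LEMMAS AND PROOFS =====

-- max of the segment lengths, as a foldr (proof-side helper)
def pvMaxLen (gs : List (List Char)) : Int :=
  gs.foldr (fun g m => max (g.length : Int) m) 0

theorem pvMaxLen_nonneg (gs : List (List Char)) : 0 ≤ pvMaxLen gs := by
  induction gs with
  | nil => simp [pvMaxLen]
  | cons g t ih => simp only [pvMaxLen, List.foldr_cons] at ih ⊢; omega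

theorem pvMaxLen_append (a b : List (List Char)) :
    pvMaxLen (a ++ b) = max (pvMaxLen a) (pvMaxLen b) := by
  induction a with
  | nil =>
    have h := pvMaxLen_nonneg b
    simp only [List.nil_append, pvMaxLen, List.foldr_nil] at *
    omega
  | cons g t ih => simp only [pvMaxLen, List.foldr_cons, List.cons_append] at ih ⊢; omega

theorem pvMaxLen_reverse (l : List (List Char)) : pvMaxLen l.reverse = pvMaxLen l := by
  induction l with
  | nil => rfl
  | cons g t ih =>
    rw [List.reverse_cons, pvMaxLen_append, ih]
    simp only [pvMaxLen, List.foldr_cons, List.foldr_nil]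
    omega

theorem pvFoldl_max (t : List (List Char)) : ∀ (a : Int), 0 ≤ a →
    (t.map (fun g => (g.length : Int))).foldl max a = max a (pvMaxLen t) := by
  induction t with
  | nil =>
    intro a ha
    simp only [List.map_nil, List.foldl_nil, pvMaxLen, List.foldr_nil]
    omega
  | cons g t ih =>
    intro a ha
    simp only [List.map_cons, List.foldl_cons]
    rw [ih (max a (g.length : Int)) (by positivity)]
    simp only [pvMaxLen, List.foldr_cons]
    omega

-- B computes pvMaxLen of the split segments
theorem alt_eq_maxLen (s : String) :
    longest_special_run_alt s
      = pvMaxLen (PySem.Chars.split₀ (s.toList.map (fun ch => if pvSpecial ch then ch else ' '))) := by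
  unfold longest_special_run_alt
  cases h : PySem.Chars.split₀ (s.toList.map (fun ch => if pvSpecial ch then ch else ' ')) with
  | nil => simp [h, PySem.List.max?, pvMaxLen]
  | cons g t =>
    simp only [h, List.map_cons, PySem.List.max?_id_cons]
    rw [pvFoldl_max t (g.length : Int) (by positivity)]
    simp [pvMaxLen]

-- equation lemmas for the split worker
theorem go_nil (cur : List Char) (acc : List (List Char)) :
    PySem.Chars.split₀.go [] cur acc
      = if cur.isEmpty then acc.reverse else (cur.reverse :: acc).reverse := by
  rfl

theorem go_cons (c : Char) (rest cur : List Char) (acc : List (List Char)) :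
    PySem.Chars.split₀.go (c :: rest) cur acc
      = if PySem.Chars.isspace c then
          (if cur.isEmpty then PySem.Chars.split₀.go rest [] acc
           else PySem.Chars.split₀.go rest [] (cur.reverse :: acc))
        else PySem.Chars.split₀.go rest (c :: cur) acc := by
  rfl

theorem special_not_space {c : Char} (h : pvSpecial c = true) :
    PySem.Chars.isspace c = false := by
  unfold pvSpecial at h
  cases hs : PySem.Chars.isspace c <;> simp [hs] at h ⊢

-- main invariant: the split-based max over the mapped tail equals A's loop run
-- from the state (current run length, max of finished and current runs)
theorem main_inv (cs : List Char) : ∀ (cur : List Char) (acc : List (List Char)),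
    pvMaxLen (PySem.Chars.split₀.go (cs.map (fun ch => if pvSpecial ch then ch else ' ')) cur acc)
      = (cs.foldl
          (fun (p : Int × Int) ch =>
            if pvSpecial ch then
              let cur := p.1 + 1
              (cur, max p.2 cur)
            else (0, p.2))
          ((cur.length : Int), max (pvMaxLen acc) (cur.length : Int))).2 := by
  induction cs with
  | nil =>
    intro cur acc
    simp only [List.map_nil, List.foldl_nil, go_nil]
    cases cur with
    | nil =>
      have := pvMaxLen_nonneg acc
      simp [pvMaxLen_reverse]; omega
    | cons c cur' =>
      rw [if_neg (by simp)]
      rw [pvMaxLen_reverse]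
      simp [pvMaxLen]
      omega
  | cons c cs ih =>
    intro cur acc
    simp only [List.map_cons, List.foldl_cons]
    by_cases hc : pvSpecial c = true
    · simp only [hc, if_true]
      rw [go_cons, if_neg (by rw [special_not_space hc]; simp)]
      rw [ih (c :: cur) acc]
      have h1 : ((c :: cur).length : Int) = (cur.length : Int) + 1 := by simp
      rw [h1]
      have h2 : max (pvMaxLen acc) ((cur.length : Int) + 1)
          = max (max (pvMaxLen acc) (cur.length : Int)) ((cur.length : Int) + 1) := by omega
      rw [h2]
    · have hc' : pvSpecial c = false := by cases h : pvSpecial c; rfl; exact absurd h hc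
      simp only [hc', Bool.false_eq_true, if_false]
      have hsp : PySem.Chars.isspace ' ' = true := by decide
      rw [go_cons, if_pos hsp]
      cases cur with
      | nil =>
        rw [if_pos (by simp)]
        rw [ih [] acc]
        have := pvMaxLen_nonneg acc
        have h0 : max (pvMaxLen acc) ((List.nil : List Char).length : Int) = pvMaxLen acc := by
          simp; omega
        simp only [h0]
        simp
      | cons d cur' =>
        rw [if_neg (by simp)]
        rw [ih [] ((d :: cur').reverse :: acc)]
        have h1 : pvMaxLen ((d :: cur').reverse :: acc)
            = max (((d :: cur').length : Int)) (pvMaxLen acc) := by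
          simp [pvMaxLen]
        have := pvMaxLen_nonneg acc
        have h2 : max (pvMaxLen ((d :: cur').reverse :: acc)) ((List.nil : List Char).length : Int)
            = max (pvMaxLen acc) (((d :: cur').length : Int)) := by
          rw [h1]; simp; omega
        rw [h2]
        simp

-- ===== VERDICT (by name: the statement is the Claim_ definition above) =====
theorem longest_special_run_spec : Claim_equal_longest_special_run := by
  intro s _
  unfold Spec_longest_special_run
  rw [alt_eq_maxLen]
  unfold longest_special_run
  by_cases hs : s.toList = []
  · rw [if_pos hs, hs]
    simp [PySem.Chars.split₀, go_nil, pvMaxLen]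
  · rw [if_neg hs]
    unfold PySem.Chars.split₀
    have := main_inv s.toList [] []
    simp only [List.length_nil, Nat.cast_zero] at this
    rw [this]
    norm_num [pvMaxLen]
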